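-- pv_equiv track=rewrite | github.com/adinashby-vanier-college/programming-in-science-lab-5-sydneysmithblaise | Lab5.py | number_pattern
-- ===== SOURCE A (Python) =====
-- def number_pattern(n):
--     result = ""
--
--     for i in range(n):
--         count = 1
--
--         for k in range(i +1 ):
--             result += str(count)
--             count += 1
--
--         result += "\n"
--
--     return result.rstrip()
-- ===== SOURCE B (Python) =====
-- def number_pattern(n):
--     rows = []
--     line = ""
--     for i in range(n):
--         line += str(i + 1)
--         rows.append(line)
--     return "\n".join(rows)
-- ===== Notes on version B (the rewrite author's own statement) =====
-- stated objective: faster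
-- what changed: Replaces the quadratic-per-character nested loop (each row rebuilt digit by digit from 1) with a single pass that extends one accumulator line per row and joins the rows with '\n', avoiding both the inner loop and the final rstrip.
import Mathlib
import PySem

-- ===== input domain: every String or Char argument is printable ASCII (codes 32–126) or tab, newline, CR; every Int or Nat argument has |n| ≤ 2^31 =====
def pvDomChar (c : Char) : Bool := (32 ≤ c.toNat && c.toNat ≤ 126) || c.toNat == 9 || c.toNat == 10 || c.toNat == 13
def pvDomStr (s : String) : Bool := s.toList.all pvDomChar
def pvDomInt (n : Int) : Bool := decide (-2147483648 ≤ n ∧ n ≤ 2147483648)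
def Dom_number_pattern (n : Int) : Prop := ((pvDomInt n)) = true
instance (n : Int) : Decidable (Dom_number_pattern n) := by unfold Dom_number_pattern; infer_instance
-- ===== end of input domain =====

-- B builds each row by extending a single accumulator line (one append per row) and joins the
-- rows with "\n", replacing A's nested inner loop that rebuilds every row from 1 and the final rstrip.

-- ===== PORT A =====
def number_pattern (n : Int) : String :=
  let result : List Char :=
    (PySem.List.pyRange 0 n).foldl
      (fun result i =>
        (((PySem.List.pyRange 0 (i + 1)).foldl
            (fun (rc : List Char × Int) _k => (rc.1 ++ PySem.Int.toChars rc.2, rc.2 + 1))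
            (result, 1)).1) ++ ['\n'])
      []
  String.ofList (PySem.Chars.rstrip result)

-- ===== PORT B =====
def number_pattern_alt (n : Int) : String :=
  let st :=
    (PySem.List.pyRange 0 n).foldl
      (fun (s : List Char × List (List Char)) i =>
        let line := s.1 ++ PySem.Int.toChars (i + 1)
        (line, s.2 ++ [line]))
      ([], [])
  String.ofList (PySem.Chars.join ['\n'] st.2)

-- ===== PRECONDITION & SPEC =====
def Spec_number_pattern (n : Int) (out : String) : Prop := out = number_pattern_alt n
instance (n : Int) (out : String) : Decidable (Spec_number_pattern n out) := by unfold Spec_number_pattern; infer_instance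

-- ===== CLAIM (what is proved, stated in full; the proofs are below) =====
def Claim_equal_number_pattern : Prop := ∀ (n : Int), Dom_number_pattern n → Spec_number_pattern n (number_pattern n)

-- ===== LEMMAS AND PROOFS =====

-- concatenation of str(c), str(c+1), …, str(c+m-1)
def pvBlock (c : Int) : Nat → List Char
  | 0 => []
  | m + 1 => PySem.Int.toChars c ++ pvBlock (c + 1) m

-- the rows "1", "12", …, "12…m"
def pvRows : Nat → List (List Char)
  | 0 => []
  | m + 1 => pvRows m ++ [pvBlock 1 (m + 1)]

-- A's accumulated string after m outer iterations
def pvBody : Nat → List Char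
  | 0 => []
  | m + 1 => pvBody m ++ (pvBlock 1 (m + 1) ++ ['\n'])

theorem pvBlock_snoc (m : Nat) : ∀ c : Int,
    pvBlock c m ++ PySem.Int.toChars (c + m) = pvBlock c (m + 1) := by
  induction m with
  | zero => intro c; simp [pvBlock]
  | succ k ih =>
      intro c
      have := ih (c + 1)
      simp [pvBlock] at *
      rw [show c + (↑k + 1) = c + 1 + ↑k by ring, this]

theorem pv_digitChar_nonspace (d : Nat) : PySem.Chars.isspace (Nat.digitChar d) = false := by
  rcases Nat.lt_or_ge d 16 with h | h
  · interval_cases d <;> decide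
  · have e : Nat.digitChar d = '*' := by
      unfold Nat.digitChar
      rw [if_neg (by omega), if_neg (by omega), if_neg (by omega), if_neg (by omega),
          if_neg (by omega), if_neg (by omega), if_neg (by omega), if_neg (by omega),
          if_neg (by omega), if_neg (by omega), if_neg (by omega), if_neg (by omega),
          if_neg (by omega), if_neg (by omega), if_neg (by omega), if_neg (by omega)]
    rw [e]; decide

theorem pv_toDigitsCore_nonspace (fuel : Nat) : ∀ (n : Nat) (ds : List Char),
    (∀ c ∈ ds, PySem.Chars.isspace c = false) →
    ∀ c ∈ Nat.toDigitsCore 10 fuel n ds, PySem.Chars.isspace c = false := by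
  induction fuel with
  | zero => intro n ds hds c hc; exact hds c hc
  | succ k ih =>
      intro n ds hds c hc
      simp only [Nat.toDigitsCore] at hc
      split at hc
      · rcases List.mem_cons.mp hc with h | h
        · subst h; exact pv_digitChar_nonspace _
        · exact hds c h
      · refine ih _ _ ?_ c hc
        intro c' hc'
        rcases List.mem_cons.mp hc' with h | h
        · subst h; exact pv_digitChar_nonspace _
        · exact hds c' h

theorem pv_toDigitsCore_ne_nil_aux (fuel : Nat) : ∀ (n : Nat) (ds : List Char), ds ≠ [] →
    Nat.toDigitsCore 10 fuel n ds ≠ [] := by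
  induction fuel with
  | zero => intro n ds h; simpa [Nat.toDigitsCore] using h
  | succ k ih =>
      intro n ds h
      simp only [Nat.toDigitsCore]
      split
      · exact List.cons_ne_nil _ _
      · exact ih _ _ (List.cons_ne_nil _ _)

theorem pv_toDigitsCore_ne_nil (fuel n : Nat) (ds : List Char) (h : fuel ≠ 0) :
    Nat.toDigitsCore 10 fuel n ds ≠ [] := by
  cases fuel with
  | zero => exact absurd rfl h
  | succ k =>
      simp only [Nat.toDigitsCore]
      split
      · exact List.cons_ne_nil _ _
      · exact pv_toDigitsCore_ne_nil_aux _ _ _ (List.cons_ne_nil _ _)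

theorem pv_toChars_nonspace (z : Int) : ∀ c ∈ PySem.Int.toChars z, PySem.Chars.isspace c = false := by
  intro c hc
  unfold PySem.Int.toChars at hc
  split at hc
  · rcases List.mem_cons.mp hc with h | h
    · subst h; decide
    · exact pv_toDigitsCore_nonspace _ _ _ (by simp) c h
  · exact pv_toDigitsCore_nonspace _ _ _ (by simp) c hc

theorem pv_toChars_ne_nil (z : Int) : PySem.Int.toChars z ≠ [] := by
  unfold PySem.Int.toChars
  split
  · exact List.cons_ne_nil _ _
  · exact pv_toDigitsCore_ne_nil _ _ _ (Nat.succ_ne_zero _)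

theorem pvBlock_succ_ne_nil (c : Int) (m : Nat) : pvBlock c (m + 1) ≠ [] := by
  simp only [pvBlock]
  intro h
  exact pv_toChars_ne_nil c (List.append_eq_nil_iff.mp h).1

theorem pvBlock_nonspace (m : Nat) : ∀ (c : Int), ∀ ch ∈ pvBlock c m, PySem.Chars.isspace ch = false := by
  induction m with
  | zero => intro c ch h; simp [pvBlock] at h
  | succ k ih =>
      intro c ch h
      rcases List.mem_append.mp h with h | h
      · exact pv_toChars_nonspace c ch h
      · exact ih (c + 1) ch h

-- rstrip leaves a string ending in a non-space block unchanged
theorem pv_rstrip_append (x y : List Char) (hy : y ≠ [])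
    (hns : ∀ c ∈ y, PySem.Chars.isspace c = false) :
    PySem.Chars.rstrip (x ++ y) = x ++ y := by
  simp only [PySem.Chars.rstrip]
  have hstep : List.dropWhile PySem.Chars.isspace (x ++ y).reverse = (x ++ y).reverse := by
    apply List.dropWhile_eq_self_iff.mpr
    intro h
    have hyr : 0 < y.reverse.length := by
      simpa using List.length_pos_iff.mpr hy
    have e : (x ++ y).reverse[0]'h = y.reverse[0]'hyr := by
      simp [List.reverse_append, List.getElem_append_left hyr]
    rw [e]
    have hmem := List.mem_reverse.mp (List.getElem_mem hyr)
    exact fun hc => Bool.false_ne_true ((hns _ hmem) ▸ hc)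
  rw [hstep, List.reverse_reverse]

theorem pv_rstrip_snoc_space (x : List Char) (c : Char) (hc : PySem.Chars.isspace c = true) :
    PySem.Chars.rstrip (x ++ [c]) = PySem.Chars.rstrip x := by
  simp [PySem.Chars.rstrip, hc]

theorem pv_intercalate_snoc (sep b : List Char) : ∀ (rs : List (List Char)), rs ≠ [] →
    List.intercalate sep (rs ++ [b]) = List.intercalate sep rs ++ sep ++ b := by
  intro rs
  induction rs with
  | nil => intro h; exact absurd rfl h
  | cons a t ih =>
      intro _
      cases t with
      | nil => simp [List.intercalate, List.intersperse]
      | cons a' t' =>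
          have := ih (List.cons_ne_nil _ _)
          simp [List.intercalate, List.intersperse] at this ⊢
          simp [this]

-- pvRows (m+1) always decomposes as "prefix ++ last block"
theorem pv_join_rows_succ (m : Nat) :
    PySem.Chars.join ['\n'] (pvRows (m + 1)) =
      (if m = 0 then ([] : List Char)
       else PySem.Chars.join ['\n'] (pvRows m) ++ ['\n']) ++ pvBlock 1 (m + 1) := by
  cases m with
  | zero => simp [pvRows, PySem.Chars.join, List.intercalate]
  | succ k =>
      have hne : pvRows (k + 1) ≠ [] := by simp [pvRows]
      simp only [pvRows, PySem.Chars.join] at *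
      rw [pv_intercalate_snoc _ _ _ hne]
      simp

-- A's inner loop: appends str(c), str(c+1), …, and advances count
theorem pv_inner (m : Nat) : ∀ (r : List Char) (c : Int),
    (PySem.List.pyRange 0 (m : Int)).foldl
      (fun (rc : List Char × Int) _k => (rc.1 ++ PySem.Int.toChars rc.2, rc.2 + 1)) (r, c)
      = (r ++ pvBlock c m, c + m) := by
  induction m with
  | zero => intro r c; simp [pvBlock, PySem.List.pyRange]
  | succ k ih =>
      intro r c
      have : PySem.List.pyRange 0 ((k : Int) + 1) = PySem.List.pyRange 0 (k : Int) ++ [(k : Int)] :=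
        PySem.List.pyRange_one_succ_right (by positivity)
      push_cast
      rw [this, List.foldl_append, ih]
      simp [pvBlock_snoc, add_assoc]

-- A's outer loop builds pvBody
theorem pv_outerA (m : Nat) :
    (PySem.List.pyRange 0 (m : Int)).foldl
      (fun result i =>
        (((PySem.List.pyRange 0 (i + 1)).foldl
            (fun (rc : List Char × Int) _k => (rc.1 ++ PySem.Int.toChars rc.2, rc.2 + 1))
            (result, 1)).1) ++ ['\n']) []
      = pvBody m := by
  induction m with
  | zero => simp [pvBody, PySem.List.pyRange]
  | succ k ih =>
      have : PySem.List.pyRange 0 ((k : Int) + 1) = PySem.List.pyRange 0 (k : Int) ++ [(k : Int)] :=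
        PySem.List.pyRange_one_succ_right (by positivity)
      push_cast
      rw [this, List.foldl_append, ih]
      simp only [List.foldl_cons, List.foldl_nil]
      have h1 : ((k : Int) + 1) = ((k + 1 : Nat) : Int) := by push_cast; ring
      rw [h1, pv_inner]
      simp [pvBody]

-- B's loop carries (current line, rows)
theorem pv_outerB (m : Nat) :
    (PySem.List.pyRange 0 (m : Int)).foldl
      (fun (s : List Char × List (List Char)) i =>
        (s.1 ++ PySem.Int.toChars (i + 1), s.2 ++ [s.1 ++ PySem.Int.toChars (i + 1)]))
      ([], [])
      = (pvBlock 1 m, pvRows m) := by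
  induction m with
  | zero => simp [pvBlock, pvRows, PySem.List.pyRange]
  | succ k ih =>
      have : PySem.List.pyRange 0 ((k : Int) + 1) = PySem.List.pyRange 0 (k : Int) ++ [(k : Int)] :=
        PySem.List.pyRange_one_succ_right (by positivity)
      push_cast
      rw [this, List.foldl_append, ih]
      have hb : pvBlock 1 k ++ PySem.Int.toChars ((k : Int) + 1) = pvBlock 1 (k + 1) := by
        have := pvBlock_snoc k 1
        rw [show (1 : Int) + (k : Int) = (k : Int) + 1 by ring] at this
        exact this
      simp [pvRows, hb]

theorem pv_body_join (k : Nat) :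
    pvBody (k + 1) = PySem.Chars.join ['\n'] (pvRows (k + 1)) ++ ['\n'] := by
  induction k with
  | zero => simp [pvBody, pvRows, pvBlock, PySem.Chars.join, List.intercalate]
  | succ j ihj =>
      rw [pvBody, ihj, pv_join_rows_succ (j + 1)]
      simp

-- the glue: rstrip of A's accumulated string is the join of B's rows
theorem pv_main (m : Nat) :
    PySem.Chars.rstrip (pvBody m) = PySem.Chars.join ['\n'] (pvRows m) := by
  induction m with
  | zero => simp [pvBody, pvRows, PySem.Chars.rstrip, PySem.Chars.join, List.intercalate]
  | succ k _ =>
      have hjoin := pv_join_rows_succ k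
      rw [pv_body_join k, pv_rstrip_snoc_space _ _ (by decide), hjoin]
      apply pv_rstrip_append
      · exact pvBlock_succ_ne_nil 1 k
      · exact pvBlock_nonspace (k + 1) 1

theorem pv_range_nil (n : Int) (h : n ≤ 0) : PySem.List.pyRange 0 n = [] := by
  simp only [PySem.List.pyRange, one_ne_zero, ↓reduceIte, one_mul, zero_add, zero_lt_one, sub_zero,
    add_sub_cancel_right, EuclideanDomain.div_one, List.map_eq_nil_iff, List.range_eq_nil,
    ite_eq_right_iff, Int.toNat_eq_zero, h, implies_true]

-- ===== VERDICT (by name: the statement is the Claim_ definition above) =====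
theorem number_pattern_spec : Claim_equal_number_pattern := by
  intro n _
  unfold Spec_number_pattern number_pattern number_pattern_alt
  by_cases h : n ≤ 0
  · rw [pv_range_nil n h]
    simp [PySem.Chars.rstrip, PySem.Chars.join, List.intercalate]
  · push Not at h
    obtain ⟨m, rfl⟩ : ∃ m : Nat, n = (m : Int) := ⟨n.toNat, (Int.toNat_of_nonneg h.le).symm⟩
    simp only []
    rw [pv_outerA, pv_outerB, pv_main]
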